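-- pv_equiv track=rewrite | github.com/RishithSuresh/Random-Password-Generator | password_analyzer.py | check_sequential_patterns
-- ===== SOURCE A (Python) =====
-- def check_sequential_patterns(password):
--     """Check for sequential patterns (abc, 123, etc.)"""
--     sequential_count = 0
--     password_lower = password.lower()
--
--     for i in range(len(password_lower) - 2):
--         # Check for ascending sequences
--         if (ord(password_lower[i+1]) == ord(password_lower[i]) + 1 and
--             ord(password_lower[i+2]) == ord(password_lower[i]) + 2):
--             sequential_count += 1
--         # Check for descending sequences
--         elif (ord(password_lower[i+1]) == ord(password_lower[i]) - 1 and
--               ord(password_lower[i+2]) == ord(password_lower[i]) - 2):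
--             sequential_count += 1
--
--     return sequential_count
-- ===== SOURCE B (Python) =====
-- def check_sequential_patterns(password):
--     """Check for sequential patterns (abc, 123, etc.)"""
--     s = password.lower()
--     deltas = [ord(b) - ord(a) for a, b in zip(s, s[1:])]
--     total = 0
--     run = 0     # length of the current maximal run of a constant +1 or -1 delta
--     prev = 0
--     for d in deltas:
--         if d == 1 or d == -1:
--             if d == prev:
--                 run += 1
--             else:
--                 total += max(run - 1, 0)
--                 run = 1
--         else:
--             total += max(run - 1, 0)
--             run = 0
--         prev = d
--     total += max(run - 1, 0)
--     return total
-- ===== Notes on version B (the rewrite author's own statement) =====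
-- stated objective: alternative
-- what changed: B first builds the consecutive-difference sequence of the lowercased password and counts sequential triples by scanning maximal runs of a constant +1/-1 step, adding run_length-1 per run, instead of A's independent three-character test at every index.
import Mathlib
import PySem

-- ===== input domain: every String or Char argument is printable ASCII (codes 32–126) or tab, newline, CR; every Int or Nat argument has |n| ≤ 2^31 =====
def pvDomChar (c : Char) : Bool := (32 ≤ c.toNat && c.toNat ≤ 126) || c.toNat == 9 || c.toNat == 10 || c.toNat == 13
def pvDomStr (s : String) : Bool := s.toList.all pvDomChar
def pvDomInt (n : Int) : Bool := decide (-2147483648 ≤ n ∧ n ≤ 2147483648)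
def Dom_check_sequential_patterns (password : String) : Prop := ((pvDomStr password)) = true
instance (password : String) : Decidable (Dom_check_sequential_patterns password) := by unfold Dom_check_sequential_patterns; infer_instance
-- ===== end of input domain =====

-- B replaces A's per-index triple test by one scan over the consecutive-difference
-- sequence, grouping maximal runs of a constant ±1 step and adding run_length-1 per run
-- (objective: alternative decomposition, same cost).

-- ===== PORT A =====
def check_sequential_patterns (password : String) : Int :=
  let password_lower := (PySem.Str.lower password).toList
  (PySem.List.pyRange 0 ((password_lower.length : Int) - 2) 1).foldl
    (fun sequential_count i =>
      if ((PySem.List.pyGetD password_lower (i+1) ' ').toNat : Int)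
            = ((PySem.List.pyGetD password_lower i ' ').toNat : Int) + 1 ∧
         ((PySem.List.pyGetD password_lower (i+2) ' ').toNat : Int)
            = ((PySem.List.pyGetD password_lower i ' ').toNat : Int) + 2 then
        sequential_count + 1
      else if ((PySem.List.pyGetD password_lower (i+1) ' ').toNat : Int)
            = ((PySem.List.pyGetD password_lower i ' ').toNat : Int) - 1 ∧
         ((PySem.List.pyGetD password_lower (i+2) ' ').toNat : Int)
            = ((PySem.List.pyGetD password_lower i ' ').toNat : Int) - 2 then
        sequential_count + 1
      else sequential_count) 0

-- ===== PORT B =====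
-- deltas of Source B: [ord(b) - ord(a) for a, b in zip(s, s[1:])]
def pvDeltas (cs : List Char) : List Int :=
  (cs.zip (cs.drop 1)).map (fun p => (p.2.toNat : Int) - (p.1.toNat : Int))

-- the for-loop of Source B over the delta list, state (total, run, prev)
def pvRunLoop : List Int → Int → Int → Int → Int
  | [], total, run, _ => total + max (run - 1) 0
  | d :: ds, total, run, prev =>
      if d = 1 ∨ d = -1 then
        if d = prev then pvRunLoop ds total (run + 1) prev
        else pvRunLoop ds (total + max (run - 1) 0) 1 d
      else pvRunLoop ds (total + max (run - 1) 0) 0 d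

def check_sequential_patterns_alt (password : String) : Int :=
  pvRunLoop (pvDeltas (PySem.Str.lower password).toList) 0 0 0

-- ===== PRECONDITION & SPEC =====
def Spec_check_sequential_patterns (password : String) (out : Int) : Prop := out = check_sequential_patterns_alt password
instance (password : String) (out : Int) : Decidable (Spec_check_sequential_patterns password out) := by unfold Spec_check_sequential_patterns; infer_instance

-- ===== CLAIM (what is proved, stated in full; the proofs are below) =====
def Claim_equal_check_sequential_patterns : Prop := ∀ (password : String), Dom_check_sequential_patterns password → Spec_check_sequential_patterns password (check_sequential_patterns password)

-- ===== LEMMAS AND PROOFS =====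

-- reference count: adjacent pairs of equal ±1 deltas
def pvPairCount : List Int → Int
  | d :: d' :: ds => (if (d = 1 ∨ d = -1) ∧ d' = d then 1 else 0) + pvPairCount (d' :: ds)
  | _ => 0

lemma pvRunLoop_eq (ds : List Int) : ∀ (total run prev : Int),
    (run = 0 → ¬(prev = 1 ∨ prev = -1)) → (0 < run → (prev = 1 ∨ prev = -1)) → 0 ≤ run →
    pvRunLoop ds total run prev = total + max (run - 1) 0 + pvPairCount (prev :: ds) := by
  induction ds with
  | nil => intro total run prev _ _ _; simp [pvRunLoop, pvPairCount]
  | cons d ds ih =>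
    intro total run prev h0 h1 hr
    by_cases hd : d = 1 ∨ d = -1
    · by_cases hdp : d = prev
      · subst hdp
        have hrpos : 0 < run := by
          rcases lt_or_eq_of_le hr with h | h
          · exact h
          · exact absurd hd (h0 h.symm)
        rw [pvRunLoop, if_pos hd, if_pos rfl,
            ih total (run + 1) d (by omega) (fun _ => hd) (by omega)]
        have : pvPairCount (d :: d :: ds) = 1 + pvPairCount (d :: ds) := by
          rw [pvPairCount, if_pos ⟨hd, rfl⟩]
        rw [this]; omega
      · rw [pvRunLoop, if_pos hd, if_neg hdp,
            ih (total + max (run - 1) 0) 1 d (by omega) (fun _ => hd) (by omega)]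
        have : pvPairCount (prev :: d :: ds) = pvPairCount (d :: ds) := by
          rw [pvPairCount, if_neg (by rintro ⟨_, h⟩; exact hdp h)]
          ring
        rw [this]; omega
    · rw [pvRunLoop, if_neg hd,
          ih (total + max (run - 1) 0) 0 d (fun _ => hd) (by omega) (by omega)]
      have : pvPairCount (prev :: d :: ds) = pvPairCount (d :: ds) := by
        rw [pvPairCount, if_neg (by rintro ⟨hp, h⟩; exact hd (h ▸ hp))]
        ring
      rw [this]; omega

lemma alt_eq_pairCount (cs : List Char) :
    pvRunLoop (pvDeltas cs) 0 0 0 = pvPairCount (pvDeltas cs) := by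
  rw [pvRunLoop_eq (pvDeltas cs) 0 0 0 (by decide) (by decide) (by decide)]
  cases h : pvDeltas cs with
  | nil => simp [pvPairCount]
  | cons d ds =>
    cases ds with
    | nil => simp [pvPairCount]
    | cons d' ds' =>
      rw [pvPairCount, if_neg (by rintro ⟨h, _⟩; rcases h with h | h <;> simp_all)]
      simp [pvPairCount]

lemma pvDeltas_cons (a b : Char) (t : List Char) :
    pvDeltas (a :: b :: t) = ((b.toNat : Int) - (a.toNat : Int)) :: pvDeltas (b :: t) := by
  simp [pvDeltas]

-- the triple condition of A at index i, as a 0/1 value on the char list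
def pvG (cs : List Char) (i : Nat) : Int :=
  if ((cs.getD (i+1) ' ').toNat : Int) = ((cs.getD i ' ').toNat : Int) + 1 ∧
     ((cs.getD (i+2) ' ').toNat : Int) = ((cs.getD i ' ').toNat : Int) + 2 then 1
  else if ((cs.getD (i+1) ' ').toNat : Int) = ((cs.getD i ' ').toNat : Int) - 1 ∧
     ((cs.getD (i+2) ' ').toNat : Int) = ((cs.getD i ' ').toNat : Int) - 2 then 1
  else 0

lemma pvPairCount_cons2 (d d' : Int) (ds : List Int) :
    pvPairCount (d :: d' :: ds) = (if (d = 1 ∨ d = -1) ∧ d' = d then 1 else 0) + pvPairCount (d' :: ds) := rfl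

lemma pvG_shift (a : Char) (cs : List Char) (i : Nat) : pvG (a :: cs) (i+1) = pvG cs i := by
  simp [pvG]

lemma sum_G_eq (cs : List Char) :
    ((List.range (cs.length - 2)).map (pvG cs)).sum = pvPairCount (pvDeltas cs) := by
  induction cs with
  | nil => simp [pvDeltas, pvPairCount]
  | cons a t ih =>
    cases t with
    | nil => simp [pvDeltas, pvPairCount]
    | cons b t' =>
      cases t' with
      | nil => simp [pvDeltas, pvPairCount]
      | cons c t'' =>
        have hlen : (a :: b :: c :: t'').length - 2 = (t''.length + 1) := by simp
        have hmap : (pvG (a :: b :: c :: t'')) ∘ (fun i => i + 1) = pvG (b :: c :: t'') := by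
          funext i; exact pvG_shift a _ i
        have hhead : pvG (a :: b :: c :: t'') 0
            = (if (((b.toNat : Int) - (a.toNat : Int)) = 1 ∨ ((b.toNat : Int) - (a.toNat : Int)) = -1) ∧
                  ((c.toNat : Int) - (b.toNat : Int)) = ((b.toNat : Int) - (a.toNat : Int)) then 1 else 0) := by
          simp [pvG, List.getD]
          split_ifs <;> omega
        rw [hlen, List.range_succ_eq_map, List.map_cons, List.sum_cons, List.map_map, hmap, hhead]
        have hlen2 : (b :: c :: t'').length - 2 = t''.length := by simp
        rw [hlen2] at ih
        simp only [pvDeltas_cons, pvPairCount_cons2] at ih ⊢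
        rw [ih]

-- A's foldl over pyRange, on any char list, equals pvPairCount of the deltas
lemma loopA_eq (cs : List Char) :
    (PySem.List.pyRange 0 ((cs.length : Int) - 2) 1).foldl
      (fun acc i =>
        if ((PySem.List.pyGetD cs (i+1) ' ').toNat : Int)
              = ((PySem.List.pyGetD cs i ' ').toNat : Int) + 1 ∧
           ((PySem.List.pyGetD cs (i+2) ' ').toNat : Int)
              = ((PySem.List.pyGetD cs i ' ').toNat : Int) + 2 then acc + 1
        else if ((PySem.List.pyGetD cs (i+1) ' ').toNat : Int)
              = ((PySem.List.pyGetD cs i ' ').toNat : Int) - 1 ∧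
           ((PySem.List.pyGetD cs (i+2) ' ').toNat : Int)
              = ((PySem.List.pyGetD cs i ' ').toNat : Int) - 2 then acc + 1
        else acc) 0 = pvPairCount (pvDeltas cs) := by
  match cs with
  | [] => rfl
  | [a] => rfl
  | a :: b :: t =>
    have hn : ((a :: b :: t).length : Int) - 2 = ((t.length : Nat) : Int) := by
      simp; ring
    rw [hn, PySem.List.pyRange_zero_natCast, List.foldl_map]
    have hbody : (fun (acc : Int) (i : Nat) =>
        if ((PySem.List.pyGetD (a :: b :: t) ((i : Int)+1) ' ').toNat : Int)
              = ((PySem.List.pyGetD (a :: b :: t) (i : Int) ' ').toNat : Int) + 1 ∧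
           ((PySem.List.pyGetD (a :: b :: t) ((i : Int)+2) ' ').toNat : Int)
              = ((PySem.List.pyGetD (a :: b :: t) (i : Int) ' ').toNat : Int) + 2 then acc + 1
        else if ((PySem.List.pyGetD (a :: b :: t) ((i : Int)+1) ' ').toNat : Int)
              = ((PySem.List.pyGetD (a :: b :: t) (i : Int) ' ').toNat : Int) - 1 ∧
           ((PySem.List.pyGetD (a :: b :: t) ((i : Int)+2) ' ').toNat : Int)
              = ((PySem.List.pyGetD (a :: b :: t) (i : Int) ' ').toNat : Int) - 2 then acc + 1
        else acc)
        = (fun (acc : Int) (i : Nat) => acc + pvG (a :: b :: t) i) := by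
      funext acc i
      have h1 : (i : Int) + 1 = ((i + 1 : Nat) : Int) := by omega
      have h2 : (i : Int) + 2 = ((i + 2 : Nat) : Int) := by omega
      rw [h1, h2]
      simp only [PySem.List.pyGetD_natCast, pvG]
      split_ifs <;> ring
    rw [hbody, PySem.List.foldl_add]
    have : (a :: b :: t).length - 2 = t.length := by simp
    rw [← this, sum_G_eq]
    ring

theorem check_sequential_patterns_spec : Claim_equal_check_sequential_patterns := by
  intro password _
  unfold Spec_check_sequential_patterns check_sequential_patterns check_sequential_patterns_alt
  rw [alt_eq_pairCount, loopA_eq]
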